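-- pv_equiv track=rewrite | github.com/nagu-io/CompressX | compressx/utils/quantization.py | match_quantization_bits
-- ===== SOURCE A (Python) =====
-- def match_quantization_bits(param_name: str, quantization_plan: dict[str, int]) -> int:
--     matched_bits = 8
--     matched_length = -1
--     for layer_name, bits in quantization_plan.items():
--         if param_name.startswith(layer_name) and len(layer_name) > matched_length:
--             matched_bits = bits
--             matched_length = len(layer_name)
--     return matched_bits
-- ===== SOURCE B (Python) =====
-- def match_quantization_bits(param_name: str, quantization_plan: dict[str, int]) -> int:
--     # Try prefixes of param_name from longest to shortest; the first one that is
--     # a key of the plan is the longest matching key (a prefix of a given length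
--     # is unique), so its bits are the answer.
--     for i in range(len(param_name), -1, -1):
--         prefix = param_name[:i]
--         if prefix in quantization_plan:
--             return quantization_plan[prefix]
--     return 8
-- ===== Notes on version B (the rewrite author's own statement) =====
-- stated objective: alternative
-- what changed: Instead of scanning the plan's items with a running max of the matched key length, B iterates over the prefixes of param_name from longest to shortest and returns the bits of the first prefix that is a key of the plan (dict lookup), defaulting to 8.
import Mathlib
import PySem

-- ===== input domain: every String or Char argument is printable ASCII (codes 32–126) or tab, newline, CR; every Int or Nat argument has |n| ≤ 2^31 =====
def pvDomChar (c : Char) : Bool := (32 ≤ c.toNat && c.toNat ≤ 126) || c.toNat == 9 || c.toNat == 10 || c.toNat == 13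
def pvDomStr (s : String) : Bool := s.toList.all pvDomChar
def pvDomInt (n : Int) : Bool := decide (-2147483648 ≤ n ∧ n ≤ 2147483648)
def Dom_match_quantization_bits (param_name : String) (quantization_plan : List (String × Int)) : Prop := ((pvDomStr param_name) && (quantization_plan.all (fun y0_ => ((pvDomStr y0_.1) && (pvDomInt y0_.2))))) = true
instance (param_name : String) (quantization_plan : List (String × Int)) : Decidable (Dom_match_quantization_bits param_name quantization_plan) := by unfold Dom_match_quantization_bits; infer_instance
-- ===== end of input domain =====

-- B replaces A's scan over the plan's items (running max of matched key length) by a scan over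
-- the PREFIXES of param_name, longest first, returning the bits of the first prefix that is a
-- key of the plan; same task, different traversal. Equivalence is exact.

-- ===== PORT A =====
def match_quantization_bits (param_name : String) (quantization_plan : List (String × Int)) : Int :=
  (quantization_plan.foldl
    (fun (st : Int × Int) kv =>
      if PySem.Str.startswith param_name kv.1 = true ∧ PySem.Str.len kv.1 > st.2
      then (kv.2, PySem.Str.len kv.1) else st)
    (8, -1)).1

-- ===== PORT B =====
-- 'for i in range(len(param_name), -1, -1)' is the downward Nat recursion; the body
-- 'if prefix in plan: return plan[prefix]' is the match on the dict lookup get?.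
def mqbAltGo (p : String) (d : PySem.Dict String Int) : Nat → Int
  | 0 =>
    match d.get? (PySem.Str.slice p none (some ((0 : Nat) : Int))) with
    | some b => b
    | none => 8                       -- loop over: return 8
  | Nat.succ i =>
    match d.get? (PySem.Str.slice p none (some ((Nat.succ i : Nat) : Int))) with
    | some b => b
    | none => mqbAltGo p d i

def match_quantization_bits_alt (param_name : String) (quantization_plan : List (String × Int)) : Int :=
  mqbAltGo param_name (PySem.Dict.mk quantization_plan) param_name.toList.length

-- ===== PRECONDITION & SPEC =====
def Spec_match_quantization_bits (param_name : String) (quantization_plan : List (String × Int)) (out : Int) : Prop := out = match_quantization_bits_alt param_name quantization_plan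
instance (param_name : String) (quantization_plan : List (String × Int)) (out : Int) : Decidable (Spec_match_quantization_bits param_name quantization_plan out) := by unfold Spec_match_quantization_bits; infer_instance

-- ===== CLAIM (what is proved, stated in full; the proofs are below) =====
def Claim_equal_match_quantization_bits : Prop := ∀ (param_name : String) (quantization_plan : List (String × Int)), Dom_match_quantization_bits param_name quantization_plan → Spec_match_quantization_bits param_name quantization_plan (match_quantization_bits param_name quantization_plan)

-- ===== LEMMAS AND PROOFS =====

-- startswith, read at the character-list level
lemma mqb_startswith_iff (p k : String) :
    PySem.Str.startswith p k = true ↔ k.toList <+: p.toList := by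
  rw [PySem.Str.startswith_eq]; exact PySem.Chars.startswith_iff _ _

-- strings with equal character lists are equal
lemma mqb_str_ext {s t : String} (h : s.toList = t.toList) : s = t := by
  have := congrArg String.ofList h
  simpa using this

-- the slice p[:i] as a character list
lemma mqb_slice_toList (p : String) (i : Nat) :
    (PySem.Str.slice p none (some ((i : Nat) : Int))).toList = p.toList.take i := by
  rw [PySem.Str.toList_slice, PySem.Chars.slice_eq_listSlice, PySem.List.slice_to_natCast]

-- a string that occurs as a key of the assoc list has a binding
lemma mqb_get?_of_mem_fst (l : List (String × Int)) (m : String)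
    (h : m ∈ l.map Prod.fst) : ∃ v, (PySem.Dict.mk l).get? m = some v := by
  rcases hv : (PySem.Dict.mk l).get? m with _ | v
  · have := (PySem.Dict.get?_eq_none_iff_not_mem_keys (PySem.Dict.mk l) m).mp hv
    rw [PySem.Dict.keys_mk] at this
    exact absurd h this
  · exact ⟨v, rfl⟩

-- max? over a snoc: the running 'first extremal' rule applied once more.
lemma mqb_max?_len_snoc (xs : List String) (y : String) :
    PySem.List.max? (xs ++ [y]) PySem.Str.len =
      some (match PySem.List.max? xs PySem.Str.len with
            | none => y
            | some m => if PySem.Str.len m < PySem.Str.len y then y else m) := by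
  show List.foldl _ none (xs ++ [y]) = _
  rw [List.foldl_append]
  show List.foldl _ (PySem.List.max? xs PySem.Str.len) [y] = _
  simp only [List.foldl_cons, List.foldl_nil]
  cases PySem.List.max? xs PySem.Str.len with
  | none => rfl
  | some m =>
    simp only [PySem.Str.len_eq, Nat.cast_lt, String.length_toList]
    split_ifs <;> rfl

-- a binding present in the left part of an assoc list is unaffected by appending on the right
lemma mqb_get?_append_of_some {v : Int} (l l' : List (String × Int)) (m : String)
    (hv : (PySem.Dict.mk l).get? m = some v) :
    (PySem.Dict.mk (l ++ l')).get? m = some v := by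
  simp only [PySem.Dict.get?] at hv ⊢
  rw [List.find?_append]
  rcases hf : List.find? (fun q => q.1 == m) l with _ | q
  · simp [hf] at hv
  · simpa [hf] using hv

-- Invariant for A: the fold state over a prefix of the plan is exactly (looked-up bits of the
-- current longest matching key, its length), or the initial (8, -1) when nothing has matched yet.
lemma mqb_inv (p : String) (l : List (String × Int)) :
    List.foldl
      (fun (st : Int × Int) kv =>
        if PySem.Str.startswith p kv.1 = true ∧ PySem.Str.len kv.1 > st.2
        then (kv.2, PySem.Str.len kv.1) else st)
      (8, -1) l
  = match PySem.List.max? ((l.map Prod.fst).filter (fun k => PySem.Str.startswith p k)) PySem.Str.len with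
    | none => ((8 : Int), (-1 : Int))
    | some m => (((PySem.Dict.mk l).get? m).getD 8, PySem.Str.len m) := by
  induction l using List.reverseRecOn with
  | nil => simp [PySem.List.max?]
  | append_singleton l x ih =>
    obtain ⟨k0, b0⟩ := x
    rw [List.foldl_append, ih]
    simp only [List.map_append, List.filter_append, List.map_cons, List.map_nil,
      List.filter_cons, List.filter_nil, List.foldl_cons, List.foldl_nil]
    by_cases hsw : PySem.Str.startswith p k0 = true
    · rw [if_pos hsw, mqb_max?_len_snoc]
      cases hM : PySem.List.max? ((l.map Prod.fst).filter (fun k => PySem.Str.startswith p k)) PySem.Str.len with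
      | none =>
        -- nothing matched in l: the new key wins, and it cannot already be a key of l
        have hempty : (l.map Prod.fst).filter (fun k => PySem.Str.startswith p k) = [] :=
          (PySem.List.max?_eq_none_iff _ _).mp hM
        have hnk : k0 ∉ l.map Prod.fst := by
          intro hk
          have : k0 ∈ (l.map Prod.fst).filter (fun k => PySem.Str.startswith p k) :=
            List.mem_filter.mpr ⟨hk, hsw⟩
          rw [hempty] at this
          exact absurd this (List.not_mem_nil)
        have hget : (PySem.Dict.mk l).get? k0 = none := by
          rw [PySem.Dict.get?_eq_none_iff_not_mem_keys, PySem.Dict.keys_mk]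
          exact hnk
        have hlen : PySem.Str.len k0 > (-1 : Int) := by
          rw [PySem.Str.len_eq]; omega
        rw [if_pos ⟨hsw, hlen⟩]
        have hgapp : (PySem.Dict.mk (l ++ [(k0, b0)])).get? k0 = some b0 := by
          simp only [PySem.Dict.get?] at hget ⊢
          rw [List.find?_append]
          simp only [Option.map_eq_none_iff] at hget
          simp [hget]
        simp [hgapp]
      | some m =>
        have hmax : ∀ y ∈ (l.map Prod.fst).filter (fun k => PySem.Str.startswith p k),
            PySem.Str.len y ≤ PySem.Str.len m := PySem.List.max?_isMax hM
        have hmem : m ∈ (l.map Prod.fst).filter (fun k => PySem.Str.startswith p k) :=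
          PySem.List.max?_mem hM
        obtain ⟨v, hv⟩ := mqb_get?_of_mem_fst l m (List.mem_filter.mp hmem).1
        have hvapp := mqb_get?_append_of_some l [(k0, b0)] m hv
        by_cases hgt : PySem.Str.len m < PySem.Str.len k0
        · -- the new key is strictly longer: it takes over; it cannot already be a key of l
          have hnk : k0 ∉ l.map Prod.fst := by
            intro hk
            have : k0 ∈ (l.map Prod.fst).filter (fun k => PySem.Str.startswith p k) :=
              List.mem_filter.mpr ⟨hk, hsw⟩
            exact absurd (hmax _ this) (by omega)
          have hget : (PySem.Dict.mk l).get? k0 = none := by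
            rw [PySem.Dict.get?_eq_none_iff_not_mem_keys, PySem.Dict.keys_mk]
            exact hnk
          have hgapp : (PySem.Dict.mk (l ++ [(k0, b0)])).get? k0 = some b0 := by
            simp only [PySem.Dict.get?] at hget ⊢
            rw [List.find?_append]
            simp only [Option.map_eq_none_iff] at hget
            simp [hget]
          rw [if_pos ⟨hsw, hgt⟩]
          have hgt' : m.length < k0.length := by
            simpa [PySem.Str.len_eq] using hgt
          simp [hgt', hgapp]
        · have hgt' : ¬ m.length < k0.length := by
            simpa [PySem.Str.len_eq] using hgt
          simp [hgt', hv, hvapp]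
    · rw [if_neg hsw]
      simp only [List.append_nil]
      cases hM : PySem.List.max? ((l.map Prod.fst).filter (fun k => PySem.Str.startswith p k)) PySem.Str.len with
      | none =>
        rw [if_neg (by intro h; exact hsw h.1)]
      | some m =>
        rw [if_neg (by intro h; exact hsw h.1)]
        have hmem : m ∈ (l.map Prod.fst).filter (fun k => PySem.Str.startswith p k) :=
          PySem.List.max?_mem hM
        obtain ⟨v, hv⟩ := mqb_get?_of_mem_fst l m (List.mem_filter.mp hmem).1
        have hvapp := mqb_get?_append_of_some l [(k0, b0)] m hv
        simp [hv, hvapp]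

-- Invariant for B: the downward prefix scan from i = n returns the bits of the longest matching
-- key of length ≤ n (8 when there is none).
lemma mqb_alt_inv (p : String) (l : List (String × Int)) (n : Nat) (hn : n ≤ p.toList.length) :
    mqbAltGo p (PySem.Dict.mk l) n
  = match PySem.List.max?
        ((l.map Prod.fst).filter
          (fun k => PySem.Str.startswith p k && decide (k.toList.length ≤ n))) PySem.Str.len with
    | none => (8 : Int)
    | some m => (((PySem.Dict.mk l).get? m).getD 8) := by
  induction n with
  | zero =>
    unfold mqbAltGo
    have hpref : PySem.Str.slice p none (some ((0 : Nat) : Int)) = "" := by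
      apply mqb_str_ext; rw [mqb_slice_toList]; simp
    rw [hpref]
    cases hg : (PySem.Dict.mk l).get? "" with
    | none =>
      have hnil : ((l.map Prod.fst).filter
          (fun k => PySem.Str.startswith p k && decide (k.toList.length ≤ 0))) = [] := by
        rw [List.filter_eq_nil_iff]
        intro k hk hcond
        have hlen : k.toList.length ≤ 0 := by
          have := (Bool.and_eq_true _ _).mp hcond
          exact of_decide_eq_true this.2
        have hk0 : k = "" := by
          have hx : k.toList = [] := List.eq_nil_of_length_eq_zero (by omega)
          apply mqb_str_ext; simp [hx]
        subst hk0
        rw [PySem.Dict.get?_eq_none_iff_not_mem_keys, PySem.Dict.keys_mk] at hg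
        exact hg hk
      rw [hnil]
      rfl
    | some b =>
      have hmem0 : "" ∈ l.map Prod.fst := by
        by_contra hmem
        rw [← PySem.Dict.keys_mk l, ← PySem.Dict.get?_eq_none_iff_not_mem_keys] at hmem
        rw [hmem] at hg; simp at hg
      have hin : "" ∈ ((l.map Prod.fst).filter
          (fun k => PySem.Str.startswith p k && decide (k.toList.length ≤ 0))) := by
        refine List.mem_filter.mpr ⟨hmem0, ?_⟩
        have hsw : PySem.Str.startswith p "" = true :=
          (mqb_startswith_iff p "").mpr (by simp)
        rw [Bool.and_eq_true]
        exact ⟨hsw, by decide⟩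
      cases hM : PySem.List.max? ((l.map Prod.fst).filter
          (fun k => PySem.Str.startswith p k && decide (k.toList.length ≤ 0))) PySem.Str.len with
      | none =>
        rw [(PySem.List.max?_eq_none_iff _ _).mp hM] at hin
        exact absurd hin (List.not_mem_nil)
      | some m =>
        have hmmem := PySem.List.max?_mem hM
        have hcond := (List.mem_filter.mp hmmem).2
        have hlen : m.toList.length ≤ 0 :=
          of_decide_eq_true ((Bool.and_eq_true _ _).mp hcond).2
        have hm0 : m = "" := by
          have hx : m.toList = [] := List.eq_nil_of_length_eq_zero (by omega)
          apply mqb_str_ext; simp [hx]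
        subst hm0
        simp [hg]
  | succ i ih =>
    unfold mqbAltGo
    set pref := PySem.Str.slice p none (some ((Nat.succ i : Nat) : Int)) with hprefdef
    have hpreflist : pref.toList = p.toList.take (i + 1) := mqb_slice_toList p (i + 1)
    have hpreflen : pref.toList.length = i + 1 := by
      rw [hpreflist, List.length_take]; omega
    have hprefsw : PySem.Str.startswith p pref = true := by
      rw [mqb_startswith_iff, hpreflist]; exact List.take_prefix _ _
    -- uniqueness: any matching key of length i+1 IS pref
    have huniq : ∀ k : String, PySem.Str.startswith p k = true → k.toList.length = i + 1 → k = pref := by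
      intro k hsw hklen
      apply mqb_str_ext
      rw [mqb_startswith_iff] at hsw
      rw [List.prefix_iff_eq_take] at hsw
      rw [hsw, hklen, hpreflist]
    cases hg : (PySem.Dict.mk l).get? pref with
    | none =>
      -- no key of length i+1 matches: the filter for bound i+1 equals the one for bound i
      have hfeq : ((l.map Prod.fst).filter
            (fun k => PySem.Str.startswith p k && decide (k.toList.length ≤ i + 1)))
          = ((l.map Prod.fst).filter
            (fun k => PySem.Str.startswith p k && decide (k.toList.length ≤ i))) := by
        apply List.filter_congr
        intro k hk
        cases hsw : PySem.Str.startswith p k with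
        | false => rw [Bool.false_and, Bool.false_and]
        | true =>
          rw [Bool.true_and, Bool.true_and]
          have hiff : k.toList.length ≤ i + 1 ↔ k.toList.length ≤ i := by
            constructor
            · intro hle1
              by_contra hle
              have hklen : k.toList.length = i + 1 := by omega
              have := huniq k hsw hklen
              subst this
              rw [PySem.Dict.get?_eq_none_iff_not_mem_keys, PySem.Dict.keys_mk] at hg
              exact hg hk
            · intro h; omega
          exact decide_eq_decide.mpr hiff
      rw [hfeq]
      exact ih (by omega)
    | some b =>
      have hmem0 : pref ∈ l.map Prod.fst := by
        by_contra hmem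
        rw [← PySem.Dict.keys_mk l, ← PySem.Dict.get?_eq_none_iff_not_mem_keys] at hmem
        rw [hmem] at hg; simp at hg
      have hin : pref ∈ ((l.map Prod.fst).filter
          (fun k => PySem.Str.startswith p k && decide (k.toList.length ≤ i + 1))) := by
        refine List.mem_filter.mpr ⟨hmem0, ?_⟩
        rw [Bool.and_eq_true]
        exact ⟨hprefsw, decide_eq_true (by omega)⟩
      cases hM : PySem.List.max? ((l.map Prod.fst).filter
          (fun k => PySem.Str.startswith p k && decide (k.toList.length ≤ i + 1))) PySem.Str.len with
      | none =>
        rw [(PySem.List.max?_eq_none_iff _ _).mp hM] at hin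
        exact absurd hin (List.not_mem_nil)
      | some m =>
        have hmmem := PySem.List.max?_mem hM
        have hcondm := (List.mem_filter.mp hmmem).2
        have hswm : PySem.Str.startswith p m = true := ((Bool.and_eq_true _ _).mp hcondm).1
        have hlem : m.toList.length ≤ i + 1 :=
          of_decide_eq_true ((Bool.and_eq_true _ _).mp hcondm).2
        have hgem : PySem.Str.len pref ≤ PySem.Str.len m := PySem.List.max?_isMax hM pref hin
        have hmlen : m.toList.length = i + 1 := by
          have h1 : (pref.length : Int) ≤ (m.length : Int) := by
            simpa [PySem.Str.len_eq] using hgem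
          have h2 : pref.toList.length = pref.length := by simp
          have h3 : m.toList.length = m.length := by simp
          omega
        have hmeq : m = pref := huniq m hswm hmlen
        subst hmeq
        simp [hg]

-- ===== VERDICT (by name: the statement is the Claim_ definition above) =====
theorem match_quantization_bits_spec : Claim_equal_match_quantization_bits := by
  intro p plan _
  unfold Spec_match_quantization_bits match_quantization_bits match_quantization_bits_alt
  rw [mqb_inv, mqb_alt_inv p plan p.toList.length (le_refl _)]
  have hfeq : ((plan.map Prod.fst).filter
        (fun k => PySem.Str.startswith p k && decide (k.toList.length ≤ p.toList.length)))
      = ((plan.map Prod.fst).filter (fun k => PySem.Str.startswith p k)) := by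
    apply List.filter_congr
    intro k _
    cases hsw : PySem.Str.startswith p k with
    | false => rw [Bool.false_and]
    | true =>
      have hle : k.toList.length ≤ p.toList.length :=
        List.IsPrefix.length_le ((mqb_startswith_iff p k).mp hsw)
      rw [Bool.true_and, decide_eq_true hle]
  rw [hfeq]
  cases PySem.List.max? ((plan.map Prod.fst).filter (fun k => PySem.Str.startswith p k)) PySem.Str.len with
  | none => rfl
  | some m => rfl
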